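-- pv_equiv track=rewrite | github.com/ivgnk/Pyton-Codewars-Leetcode | Leetcode/subarray_2389_easy_Longest Subsequence With Limited Sum.py | answerQueries2
-- ===== SOURCE A (Python) =====
-- def answerQueries2(nums, queries):
--     """
--     :type nums: List[int]
--     :type queries: List[int]
--     :rtype: List[int]
--     """
--     n1=sorted(nums); ll=len(n1)
--     ns=[]; ssum=0
--     for n in n1:
--         ssum = ssum+n
--         ns.append(ssum)
--     res = []
--     for i in range(len(queries)):
--         if ns[-1]<=queries[i]:
--             res.append(ll)
--             continue
--         else:
--             for j in range(ll):
--                 if ns[j]>queries[i]: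
--                     res.append(j)
--                     break
--     return res
-- ===== SOURCE B (Python) =====
-- def answerQueries2(nums, queries):
--     ns = []
--     s = 0
--     for v in sorted(nums):
--         s += v
--         ns.append(s)
--     # running maximum of the prefix sums: nondecreasing, so binary-searchable
--     mp = []
--     m = None
--     for v in ns:
--         m = v if m is None or v > m else m
--         mp.append(m)
--     total = ns[-1]
--     ll = len(ns)
--     out = []
--     for q in queries:
--         if total <= q:
--             out.append(ll)
--         else:
--             lo, hi = 0, ll
--             while lo < hi:
--                 mid = (lo + hi) // 2
--                 if mp[mid] <= q:
--                     lo = mid + 1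
--                 else:
--                     hi = mid
--             out.append(lo)
--     return out
-- ===== Notes on version B (the rewrite author's own statement) =====
-- stated objective: alternative
-- what changed: Replaces A's per-query linear scan of the prefix-sum array by a binary search over the running-maximum prefix array (which is nondecreasing even when nums has negative entries); the O(n log n) sort shared by both dominates measured time, so no speed is claimed.
-- outside the precondition, e.g. on answerQueries2([], []): A returns [], B raises IndexError
import Mathlib
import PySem

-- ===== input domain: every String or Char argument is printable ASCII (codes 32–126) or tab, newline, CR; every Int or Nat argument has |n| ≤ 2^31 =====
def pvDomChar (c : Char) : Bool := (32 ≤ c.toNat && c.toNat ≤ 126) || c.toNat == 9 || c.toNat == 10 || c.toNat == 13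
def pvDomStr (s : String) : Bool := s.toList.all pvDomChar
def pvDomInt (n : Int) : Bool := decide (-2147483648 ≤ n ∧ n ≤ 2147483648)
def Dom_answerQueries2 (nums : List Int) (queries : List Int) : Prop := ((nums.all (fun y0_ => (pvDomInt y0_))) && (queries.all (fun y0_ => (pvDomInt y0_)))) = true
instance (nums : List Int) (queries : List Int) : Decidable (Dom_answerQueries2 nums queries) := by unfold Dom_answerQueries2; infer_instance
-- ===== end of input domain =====

-- B replaces A's per-query linear scan of the prefix sums by a binary search over the
-- running-maximum prefix array (nondecreasing even with negative entries); a different algorithm,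
-- no speed claimed (the sort both share dominates).

-- ===== PORT A =====
-- A's prefix-sum loop: 'ssum = ssum + n; ns.append(ssum)'
def aPrefix : List Int → Int → List Int
  | [], _ => []
  | n :: rest, s => (s + n) :: aPrefix rest (s + n)

-- A's inner loop 'for j in range(ll): if ns[j] > queries[i]: res.append(j); break',
-- walking ns with the index counter j (none = the loop falls through without a break)
def aScan : List Int → Int → Int → Option Int
  | [], _, _ => none
  | x :: xs, q, j => if x > q then some j else aScan xs q (j + 1)

def answerQueries2 (nums : List Int) (queries : List Int) : List Int :=
  let n1 := PySem.List.sorted nums (fun x => x) false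
  let ll : Int := Int.ofNat n1.length
  let ns := aPrefix n1 0
  queries.foldl (fun res q =>
    if (PySem.List.pyGet? ns (-1)).getD 0 ≤ q then res ++ [ll]
    else match aScan ns q 0 with
      | some j => res ++ [j]
      | none => res) []

-- ===== PORT B =====
-- B's prefix-sum loop
def bPrefix : List Int → Int → List Int
  | [], _ => []
  | v :: rest, s => (s + v) :: bPrefix rest (s + v)

-- B's running-maximum loop: 'm = v if m is None or v > m else m; mp.append(m)'
def bMaxPref : List Int → Option Int → List Int
  | [], _ => []
  | v :: rest, m =>
      let m' := match m with | none => v | some m0 => if v > m0 then v else m0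
      m' :: bMaxPref rest (some m')

-- B's hand-written binary search: 'while lo < hi: mid = (lo+hi)//2; ...'
def bSearch (mp : List Int) (q : Int) (lo hi : Nat) : Nat :=
  if _h : lo < hi then
    let mid := (lo + hi) / 2
    if mp.getD mid 0 ≤ q then bSearch mp q (mid + 1) hi else bSearch mp q lo mid
  else lo
termination_by hi - lo
decreasing_by all_goals omega

def answerQueries2_alt (nums : List Int) (queries : List Int) : List Int :=
  let ns := bPrefix (PySem.List.sorted nums (fun x => x) false) 0
  let mp := bMaxPref ns none
  let total := (PySem.List.pyGet? ns (-1)).getD 0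
  let ll := ns.length
  queries.foldl (fun out q =>
    if total ≤ q then out ++ [(ll : Int)]
    else out ++ [((bSearch mp q 0 ll : Nat) : Int)]) []

-- ===== PRECONDITION & SPEC =====
-- Pre_ excludes empty nums: there A raises IndexError at ns[-1] whenever queries is nonempty
-- (and returns [] only in the degenerate all-empty case), while B evaluates ns[-1] up front and raises.
def Pre_answerQueries2 (nums : List Int) (_queries : List Int) : Prop := nums ≠ []
instance (nums : List Int) (queries : List Int) : Decidable (Pre_answerQueries2 nums queries) := by
  unfold Pre_answerQueries2; infer_instance

def pvWitness_answerQueries2 : List Int × List Int := ([4, 5, 2, 1], [3, 10, 21])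

def Spec_answerQueries2 (nums : List Int) (queries : List Int) (out : List Int) : Prop := out = answerQueries2_alt nums queries
instance (nums : List Int) (queries : List Int) (out : List Int) : Decidable (Spec_answerQueries2 nums queries out) := by unfold Spec_answerQueries2; infer_instance

-- ===== CLAIM (what is proved, stated in full; the proofs are below) =====
def Claim_equal_answerQueries2 : Prop := ∀ (nums : List Int) (queries : List Int), Dom_answerQueries2 nums queries → Pre_answerQueries2 nums queries → Spec_answerQueries2 nums queries (answerQueries2 nums queries)

-- ===== LEMMAS AND PROOFS =====

theorem bPrefix_eq_aPrefix : ∀ (l : List Int) (s : Int), bPrefix l s = aPrefix l s := by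
  intro l; induction l with
  | nil => intro s; rfl
  | cons v rest ih => intro s; simp [bPrefix, aPrefix, ih]

theorem aPrefix_length : ∀ (l : List Int) (s : Int), (aPrefix l s).length = l.length := by
  intro l; induction l with
  | nil => intro s; rfl
  | cons v rest ih => intro s; simp [aPrefix, ih]

theorem aPrefix_ne_nil {l : List Int} (h : l ≠ []) (s : Int) : aPrefix l s ≠ [] := by
  cases l with
  | nil => exact absurd rfl h
  | cons v rest => simp [aPrefix]

-- the index of the first prefix sum exceeding q (= length when there is none)
def firstGt (l : List Int) (q : Int) : Nat :=
  match l with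
  | [] => 0
  | x :: xs => if q < x then 0 else firstGt xs q + 1

theorem firstGt_le_length (l : List Int) (q : Int) : firstGt l q ≤ l.length := by
  induction l with
  | nil => simp [firstGt]
  | cons x xs ih =>
      simp only [firstGt]
      split
      · simp
      · simp; omega

theorem getD_le_of_lt_firstGt (l : List Int) (q : Int) :
    ∀ i, i < firstGt l q → l.getD i 0 ≤ q := by
  induction l with
  | nil => intro i h; simp [firstGt] at h
  | cons x xs ih =>
      intro i h
      simp only [firstGt] at h
      split at h
      · omega
      · cases i with
        | zero => simpa using by omega
        | succ i => exact ih i (by omega)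

theorem gt_at_firstGt (l : List Int) (q : Int) (h : firstGt l q < l.length) :
    q < l.getD (firstGt l q) 0 := by
  induction l with
  | nil => simp [firstGt] at h
  | cons x xs ih =>
      simp only [firstGt] at h ⊢
      by_cases hx : q < x
      · simp [hx]
      · simp only [hx, if_false] at h ⊢
        simp only [List.length_cons] at h ⊢
        simpa using ih (by omega)

theorem aScan_eq (q : Int) : ∀ (l : List Int) (j : Int),
    aScan l q j = if firstGt l q < l.length then some (j + (firstGt l q : Int)) else none := by
  intro l; induction l with
  | nil => intro j; simp [aScan, firstGt]
  | cons x xs ih =>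
      intro j
      simp only [aScan, firstGt, List.length_cons]
      by_cases hx : q < x
      · simp [hx]
      · have : ¬ x > q := hx
        simp only [this, if_false, ih (j + 1)]
        by_cases h2 : firstGt xs q < xs.length
        · simp [h2, show firstGt xs q + 1 < xs.length + 1 from by omega]
          omega
        · simp [h2, show ¬ (firstGt xs q + 1 < xs.length + 1) from by omega]

theorem firstGt_lt_of_last (l : List Int) (q : Int) (hne : l ≠ [])
    (h : q < l.getD (l.length - 1) 0) : firstGt l q < l.length := by
  by_contra hcon
  have hle := firstGt_le_length l q
  have hlen : 0 < l.length := List.length_pos_iff.mpr hne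
  have := getD_le_of_lt_firstGt l q (l.length - 1) (by omega)
  omega

theorem bMaxPref_length : ∀ (l : List Int) (m : Option Int), (bMaxPref l m).length = l.length := by
  intro l; induction l with
  | nil => intro m; rfl
  | cons v rest ih => intro m; simp [bMaxPref, ih]

theorem bMaxPref_some_getD_le_iff (q : Int) :
    ∀ (l : List Int) (m0 : Int) (j : Nat), j < l.length →
      ((bMaxPref l (some m0)).getD j 0 ≤ q ↔ (m0 ≤ q ∧ ∀ i, i ≤ j → l.getD i 0 ≤ q)) := by
  intro l; induction l with
  | nil => intro m0 j h; simp at h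
  | cons v rest ih =>
      intro m0 j hj
      simp only [bMaxPref]
      have hmax : (if v > m0 then v else m0) = max m0 v := by
        split <;> omega
      rw [hmax]
      cases j with
      | zero =>
          constructor
          · intro h
            refine ⟨by simp at h; omega, ?_⟩
            intro i hi
            interval_cases i
            simp at h ⊢; omega
          · intro ⟨h1, h2⟩
            have := h2 0 (le_refl 0)
            simp at this ⊢; omega
      | succ j =>
          simp only [List.length_cons] at hj
          have := ih (max m0 v) j (by omega)
          simp only [List.getD_cons_succ]
          rw [this]
          constructor
          · intro ⟨h1, h2⟩
            refine ⟨by omega, ?_⟩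
            intro i hi
            cases i with
            | zero => simp; omega
            | succ i => simpa using h2 i (by omega)
          · intro ⟨h1, h2⟩
            have h0 := h2 0 (by omega)
            simp at h0
            refine ⟨by omega, ?_⟩
            intro i hi
            simpa using h2 (i + 1) (by omega)

theorem bMaxPref_none_char (q : Int) (ns : List Int) (hne : ns ≠ []) (j : Nat) (hj : j < ns.length) :
    ((bMaxPref ns none).getD j 0 ≤ q ↔ ∀ i, i ≤ j → ns.getD i 0 ≤ q) := by
  cases ns with
  | nil => exact absurd rfl hne
  | cons v rest =>
      have hhead : bMaxPref (v :: rest) none = bMaxPref (v :: rest) (some v) := by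
        simp [bMaxPref]
      rw [hhead, bMaxPref_some_getD_le_iff q (v :: rest) v j hj]
      constructor
      · intro ⟨_, h2⟩; exact h2
      · intro h2
        exact ⟨by simpa using h2 0 (by omega), h2⟩

theorem mp_le_iff_lt_firstGt (q : Int) (ns : List Int) (hne : ns ≠ [])
    (hk : firstGt ns q < ns.length) (j : Nat) (hj : j < ns.length) :
    ((bMaxPref ns none).getD j 0 ≤ q ↔ j < firstGt ns q) := by
  rw [bMaxPref_none_char q ns hne j hj]
  constructor
  · intro h
    by_contra hcon
    have := h (firstGt ns q) (by omega)
    have := gt_at_firstGt ns q hk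
    omega
  · intro h i hi
    exact getD_le_of_lt_firstGt ns q i (by omega)

theorem bSearch_eq_firstGt (mp : List Int) (q : Int) (k : Nat)
    (hk : ∀ j, j < mp.length → (mp.getD j 0 ≤ q ↔ j < k)) :
    ∀ n lo hi, hi - lo ≤ n → lo ≤ k → k ≤ hi → hi ≤ mp.length → bSearch mp q lo hi = k := by
  intro n
  induction n with
  | zero =>
      intro lo hi h1 h2 h3 h4
      rw [bSearch]
      have : ¬ lo < hi := by omega
      simp only [this, dif_neg, not_false_iff]
      omega
  | succ n ih =>
      intro lo hi h1 h2 h3 h4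
      rw [bSearch]
      by_cases h : lo < hi
      · simp only [h, dif_pos]
        have hmlen : (lo + hi) / 2 < mp.length := by omega
        by_cases hc : mp.getD ((lo + hi) / 2) 0 ≤ q
        · have hlt : (lo + hi) / 2 < k := (hk _ hmlen).mp hc
          simp only [hc, if_pos]
          exact ih ((lo + hi) / 2 + 1) hi (by omega) (by omega) h3 h4
        · have hge : ¬ (lo + hi) / 2 < k := fun hl => hc ((hk _ hmlen).mpr hl)
          simp only [hc, if_neg, not_false_iff]
          exact ih lo ((lo + hi) / 2) (by omega) h2 (by omega) (by omega)
      · simp only [h, dif_neg, not_false_iff]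
        omega

theorem pyGet_neg_one_getD (ns : List Int) (hne : ns ≠ []) :
    (PySem.List.pyGet? ns (-1)).getD 0 = ns.getD (ns.length - 1) 0 := by
  have hlen : 1 ≤ ns.length := List.length_pos_iff.mpr hne
  simp [PySem.List.pyGet?, PySem.List.pyIdx?, hlen, List.getD,
        List.getElem?_eq_getElem (by omega : ns.length - 1 < ns.length)]

-- ===== VERDICT (by name: the statement is the Claim_ definition above) =====
theorem answerQueries2_spec : Claim_equal_answerQueries2 := by
  intro nums queries _hdom hpre
  unfold Spec_answerQueries2 answerQueries2 answerQueries2_alt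
  simp only [bPrefix_eq_aPrefix]
  set n1 := PySem.List.sorted nums (fun x => x) false with hn1
  have hn1ne : n1 ≠ [] := by
    rw [hn1, Ne, PySem.List.sorted_eq_nil_iff]; exact hpre
  set ns := aPrefix n1 0 with hns
  have hnsne : ns ≠ [] := aPrefix_ne_nil hn1ne 0
  have hlen : ns.length = n1.length := aPrefix_length n1 0
  have hlast := pyGet_neg_one_getD ns hnsne
  have hmplen : (bMaxPref ns none).length = ns.length := bMaxPref_length ns none
  apply PySem.List.foldl_congr_mem
  intro acc q _hq
  by_cases hc : (PySem.List.pyGet? ns (-1)).getD 0 ≤ q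
  · simp only [hc, if_pos]
    simp [hlen]
  · simp only [hc, if_neg, not_false_iff]
    have hq : q < ns.getD (ns.length - 1) 0 := by rw [← hlast]; omega
    have hk : firstGt ns q < ns.length := firstGt_lt_of_last ns q hnsne hq
    rw [aScan_eq q ns 0]
    simp only [hk, if_pos]
    have hb : bSearch (bMaxPref ns none) q 0 ns.length = firstGt ns q := by
      apply bSearch_eq_firstGt (bMaxPref ns none) q (firstGt ns q)
        (fun j hj => by
          rw [hmplen] at hj
          exact mp_le_iff_lt_firstGt q ns hnsne hk j hj)
        ns.length 0 ns.length (by omega) (by omega) (by omega) (by omega)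
    rw [hb]
    simp
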